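-- pv_equiv track=rewrite | github.com/BMartynas/1-laboratorinis | main.py | find_codons
-- ===== SOURCE A (Python) =====
-- def find_codons(sequence):
--     i = 0
--     codons = []
--     while i < len(sequence):
--         if sequence[i] == 'ATG':
--             start = i
--             j = i
--             while j < len(sequence):
--                 if sequence[j] == 'TAA' or sequence[j] == 'TAG' or sequence[j] == 'TGA':
--                     end = j
--                     codons.append(''.join(str(e)
--                                           for e in sequence[start:end + 1]))
--                     i = j
--                     break
--                 j += 1
--         i += 1
--     return codons
-- ===== SOURCE B (Python) =====
-- def find_codons(sequence):
--     # Single forward pass with a gene-buffer state machine instead of A's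
--     # nested index scans.
--     codons = []
--     gene = None  # None = outside a gene; else the codons collected since 'ATG'
--     for codon in sequence:
--         if gene is None:
--             if codon == 'ATG':
--                 gene = [codon]
--         else:
--             gene.append(codon)
--             if codon in ('TAA', 'TAG', 'TGA'):
--                 codons.append(''.join(gene))
--                 gene = None
--     return codons
-- ===== Notes on version B (the rewrite author's own statement) =====
-- stated objective: faster
-- what changed: Replaced A's nested index scans (an inner while-loop rescanning ahead for a stop codon from every 'ATG') by a single forward pass with a gene-buffer state machine that opens a buffer at 'ATG' and emits it at the first stop codon.
import Mathlib
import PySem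

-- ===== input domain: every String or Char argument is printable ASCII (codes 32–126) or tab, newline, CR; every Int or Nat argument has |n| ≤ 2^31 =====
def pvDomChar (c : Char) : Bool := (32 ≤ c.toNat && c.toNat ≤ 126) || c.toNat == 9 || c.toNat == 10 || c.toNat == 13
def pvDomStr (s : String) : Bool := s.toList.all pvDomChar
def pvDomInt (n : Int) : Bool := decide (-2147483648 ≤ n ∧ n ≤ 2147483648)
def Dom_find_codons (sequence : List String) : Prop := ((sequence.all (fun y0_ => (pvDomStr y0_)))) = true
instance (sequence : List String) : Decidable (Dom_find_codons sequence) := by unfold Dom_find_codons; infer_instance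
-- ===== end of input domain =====

-- B replaces A's nested index scans by one forward pass with a gene-buffer
-- state machine (objective: faster).

-- ===== PORT A =====
-- A's inner 'while j < len(sequence)' loop: index of the first stop codon at
-- position ≥ j, or none if the loop runs off the end without a break.
def findStopA (sequence : List String) (j : Nat) : Option Nat :=
  if h : j < sequence.length then
    if sequence[j] = "TAA" ∨ sequence[j] = "TAG" ∨ sequence[j] = "TGA" then some j
    else findStopA sequence (j + 1)
  else none
termination_by sequence.length - j

-- A's outer 'while i < len(sequence)' loop; after a break i = j then i += 1,
-- so the loop resumes at j+1.  Since i strictly increases each iteration,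
-- fuel = len(sequence) makes the recursion total without changing its value.
-- ''.join(str(e) for e in s[start:end+1]) on strings is ''.join of the slice.
def outerA (sequence : List String) : Nat → Nat → List String → List String
  | 0, _, codons => codons
  | fuel + 1, i, codons =>
    if h : i < sequence.length then
      if sequence[i] = "ATG" then
        match findStopA sequence i with
        | some j =>
            outerA sequence fuel (j + 1)
              (codons ++ [PySem.Str.join "" (PySem.List.slice sequence (some (i : Int)) (some ((j : Int) + 1)))])
        | none => outerA sequence fuel (i + 1) codons
      else outerA sequence fuel (i + 1) codons
    else codons

def find_codons (sequence : List String) : List String :=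
  outerA sequence sequence.length 0 []

-- ===== PORT B =====
-- B's single pass: state = finished codons so far + optional open gene buffer.
def goB : List String → List String → Option (List String) → List String
  | [], codons, _ => codons
  | c :: rest, codons, none =>
      if c = "ATG" then goB rest codons (some [c]) else goB rest codons none
  | c :: rest, codons, some g =>
      if c = "TAA" ∨ c = "TAG" ∨ c = "TGA" then
        goB rest (codons ++ [PySem.Str.join "" (g ++ [c])]) none
      else goB rest codons (some (g ++ [c]))

def find_codons_alt (sequence : List String) : List String :=
  goB sequence [] none

-- ===== PRECONDITION & SPEC =====
def Spec_find_codons (sequence : List String) (out : List String) : Prop := out = find_codons_alt sequence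
instance (sequence : List String) (out : List String) : Decidable (Spec_find_codons sequence out) := by unfold Spec_find_codons; infer_instance

-- ===== CLAIM (what is proved, stated in full; the proofs are below) =====
def Claim_equal_find_codons : Prop := ∀ (sequence : List String), Dom_find_codons sequence → Spec_find_codons sequence (find_codons sequence)

-- ===== LEMMAS AND PROOFS =====

-- one-step unfoldings of the inner scan
lemma findStopA_stop (sequence : List String) (j : Nat) (hj : j < sequence.length)
    (hst : sequence[j] = "TAA" ∨ sequence[j] = "TAG" ∨ sequence[j] = "TGA") :
    findStopA sequence j = some j := by
  rw [findStopA]; simp [hj, hst]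

lemma findStopA_step (sequence : List String) (j : Nat) (hj : j < sequence.length)
    (hst : ¬ (sequence[j] = "TAA" ∨ sequence[j] = "TAG" ∨ sequence[j] = "TGA")) :
    findStopA sequence j = findStopA sequence (j + 1) := by
  rw [findStopA]; simp [hj, hst]

lemma findStopA_end (sequence : List String) (j : Nat) (hj : sequence.length ≤ j) :
    findStopA sequence j = none := by
  rw [findStopA]; simp [Nat.not_lt.mpr hj]

lemma findStopA_le (sequence : List String) (j k : Nat)
    (h : findStopA sequence j = some k) : j ≤ k := by
  fun_induction findStopA sequence j with
  | case1 j hj hs => simp at h; omega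
  | case2 j hj hs ih => exact Nat.le_of_succ_le (ih h)
  | case3 j hj => simp at h

-- B in gene state at position j: find the next stop k, close the gene with the
-- segment sequence[j..k] appended to the buffer, continue outside; no stop → done.
lemma goB_gene (sequence : List String) :
    ∀ (m j : Nat), sequence.length - j ≤ m →
    ∀ (g codons : List String),
      goB (sequence.drop j) codons (some g) =
        match findStopA sequence j with
        | some k => goB (sequence.drop (k + 1))
            (codons ++ [PySem.Str.join "" (g ++ (sequence.drop j).take (k + 1 - j))]) none
        | none => codons := by
  intro m
  induction m with
  | zero =>
      intro j hm g codons
      have hj : sequence.length ≤ j := by omega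
      rw [findStopA_end sequence j hj]
      simp [List.drop_eq_nil_of_le hj, goB]
  | succ m ih =>
      intro j hm g codons
      by_cases hj : j < sequence.length
      · have hd : sequence.drop j = sequence[j] :: sequence.drop (j + 1) :=
          List.drop_eq_getElem_cons hj
        by_cases hst : sequence[j] = "TAA" ∨ sequence[j] = "TAG" ∨ sequence[j] = "TGA"
        · rw [findStopA_stop sequence j hj hst]
          show goB (sequence.drop j) codons (some g) =
            goB (sequence.drop (j + 1))
              (codons ++ [PySem.Str.join "" (g ++ (sequence.drop j).take (j + 1 - j))]) none
          have h1 : j + 1 - j = 1 := by omega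
          have h2 : (sequence.drop j).take 1 = [sequence[j]] := by rw [hd]; rfl
          rw [h1, h2, hd]
          simp [goB, hst]
        · rw [findStopA_step sequence j hj hst, hd]
          simp only [goB]
          rw [if_neg hst, ih (j + 1) (by omega) (g ++ [sequence[j]]) codons]
          cases hfs : findStopA sequence (j + 1) with
          | none => rfl
          | some k =>
              have hk : j + 1 ≤ k := findStopA_le sequence (j + 1) k hfs
              have h2 : k + 1 - j = (k + 1 - (j + 1)) + 1 := by omega
              simp only [h2, List.take_succ_cons, List.append_assoc, List.singleton_append]
      · have hj' : sequence.length ≤ j := by omega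
        rw [findStopA_end sequence j hj']
        simp [List.drop_eq_nil_of_le hj', goB]

-- once no stop codon remains, B adds nothing more
lemma goB_no_stop (sequence : List String) :
    ∀ (m j : Nat), sequence.length - j ≤ m → findStopA sequence j = none →
    ∀ codons : List String, goB (sequence.drop j) codons none = codons := by
  intro m
  induction m with
  | zero =>
      intro j hm _ codons
      have hj : sequence.length ≤ j := by omega
      simp [List.drop_eq_nil_of_le hj, goB]
  | succ m ih =>
      intro j hm hnone codons
      by_cases hj : j < sequence.length
      · have hd : sequence.drop j = sequence[j] :: sequence.drop (j + 1) :=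
          List.drop_eq_getElem_cons hj
        have hst : ¬ (sequence[j] = "TAA" ∨ sequence[j] = "TAG" ∨ sequence[j] = "TGA") := by
          intro hst
          rw [findStopA_stop sequence j hj hst] at hnone
          simp at hnone
        have hnone' : findStopA sequence (j + 1) = none := by
          rw [← findStopA_step sequence j hj hst]; exact hnone
        rw [hd]
        by_cases hatg : sequence[j] = "ATG"
        · simp only [goB]
          rw [if_pos hatg,
            goB_gene sequence (sequence.length - (j + 1)) (j + 1) (by omega), hnone']
        · simp only [goB]
          rw [if_neg hatg]
          exact ih (j + 1) (by omega) hnone' codons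
      · have hj' : sequence.length ≤ j := by omega
        simp [List.drop_eq_nil_of_le hj', goB]

-- main invariant: A's outer loop from i equals B's pass over the suffix
lemma outer_eq (sequence : List String) :
    ∀ (fuel i : Nat), sequence.length - i ≤ fuel →
    ∀ codons : List String, outerA sequence fuel i codons = goB (sequence.drop i) codons none := by
  intro fuel
  induction fuel with
  | zero =>
      intro i hm codons
      have hi : sequence.length ≤ i := by omega
      simp [outerA, List.drop_eq_nil_of_le hi, goB]
  | succ fuel ih =>
      intro i hm codons
      by_cases hi : i < sequence.length
      · have hd : sequence.drop i = sequence[i] :: sequence.drop (i + 1) :=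
          List.drop_eq_getElem_cons hi
        rw [outerA]
        rw [dif_pos hi]
        by_cases hatg : sequence[i] = "ATG"
        · have hnst : ¬ (sequence[i] = "TAA" ∨ sequence[i] = "TAG" ∨ sequence[i] = "TGA") := by
            simp [hatg]
          have hstep := findStopA_step sequence i hi hnst
          rw [if_pos hatg, hd]
          simp only [goB]
          rw [if_pos hatg,
            goB_gene sequence (sequence.length - (i + 1)) (i + 1) (by omega), hstep]
          cases hfs : findStopA sequence (i + 1) with
          | none =>
              simp only
              rw [ih (i + 1) (by omega) codons]
              exact goB_no_stop sequence (sequence.length - (i + 1)) (i + 1) (by omega) hfs codons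
          | some j =>
              simp only
              have hij : i + 1 ≤ j := findStopA_le sequence (i + 1) j hfs
              rw [ih (j + 1) (by omega)]
              -- identify A's slice with B's accumulated gene segment
              have hslice : PySem.List.slice sequence (some (i : Int)) (some ((j : Int) + 1))
                  = sequence[i] :: (sequence.drop (i + 1)).take (j + 1 - (i + 1)) := by
                have hcast : ((j : Int) + 1) = (((j + 1 : Nat) : Int)) := by push_cast; ring
                rw [hcast, PySem.List.slice_natCast, hd]
                have h3 : j + 1 - i = (j + 1 - (i + 1)) + 1 := by omega
                rw [h3, List.take_succ_cons]
              rw [hslice, hatg]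
              simp only [List.singleton_append]
        · rw [if_neg hatg, hd]
          simp only [goB]
          rw [if_neg hatg]
          exact ih (i + 1) (by omega) codons
      · have hi' : sequence.length ≤ i := by omega
        rw [outerA, dif_neg (by omega)]
        simp [List.drop_eq_nil_of_le hi', goB]

-- ===== VERDICT (by name: the statement is the Claim_ definition above) =====
theorem find_codons_spec : Claim_equal_find_codons := by
  intro sequence _
  unfold Spec_find_codons find_codons find_codons_alt
  simpa using outer_eq sequence sequence.length 0 (by omega) []
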